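-- pv_equiv track=rewrite | github.com/lookinmin/CodingTest | 문자열/BOJ_23304.py | pelin
-- ===== SOURCE A (Python) =====
-- def pelin(s):     # s의 길이가 짝수, 홀수 일 때를 구분해야 함
--     k = len(s)
--     if k == 1:
--         return True
--
--     if s == s[::-1]:
--         if k % 2 == 0:
--             if pelin(s[:k//2]) and pelin(s[k//2:]):
--                 return True
--         else:
--             if pelin(s[:k // 2]) and pelin(s[k // 2 + 1:]):
--                 return True
--     else:
--         return False
-- ===== SOURCE B (Python) =====
-- def pelin(s):
--     # A string is a "recursive palindrome" iff it is a palindrome and its chain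
--     # of left halves are palindromes too (the right half of a palindrome is the
--     # reverse of the left half, so checking one half suffices): O(n) total work.
--     if s != s[::-1]:
--         return False
--     t = s[:len(s) // 2]
--     while len(t) > 1:
--         if t != t[::-1]:
--             return False
--         t = t[:len(t) // 2]
--     return True
-- ===== Notes on version B (the rewrite author's own statement) =====
-- stated objective: faster
-- what changed: Replaces A's double recursion on both halves with an iterative descent into the left half only (the right half of a palindrome is the reverse of the left), O(n) instead of O(n log n); Pre_ excludes the empty string, on which A raises RecursionError, and palindromes whose half-chain fails, where A falls off the end and returns None instead of a bool (B returns False there).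
-- outside the precondition, e.g. on pelin('aabbaa'): A returns None, B returns False
import Mathlib
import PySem

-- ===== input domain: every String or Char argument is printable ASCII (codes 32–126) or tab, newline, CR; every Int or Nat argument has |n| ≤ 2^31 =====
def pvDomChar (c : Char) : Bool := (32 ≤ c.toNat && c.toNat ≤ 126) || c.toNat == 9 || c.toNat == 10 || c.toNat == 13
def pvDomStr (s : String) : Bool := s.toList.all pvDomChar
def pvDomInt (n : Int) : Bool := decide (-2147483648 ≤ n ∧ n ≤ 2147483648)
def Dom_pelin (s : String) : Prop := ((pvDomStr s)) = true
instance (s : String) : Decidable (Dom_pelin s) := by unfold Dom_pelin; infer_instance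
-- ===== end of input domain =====

-- B replaces A's double recursion on both halves by an iterative descent into the
-- left half only (the right half of a palindrome is the reverse of the left half).
-- Equivalence is about the RETURN value on Pre_: A returns True/False/None, ported
-- as Option Bool.

-- ===== PORT A =====
-- Transliteration on List Char; slices s[:k//2] / s[k//2:] / s[k//2+1:] have
-- in-range nonnegative bounds, so they are exactly take / drop; s[::-1] is
-- List.reverse. Python `x and y` over True/False/None: the inner `if` fires only
-- when both calls return True, otherwise the function falls off the end → None.
def pelinList (l : List Char) : Option Bool :=
  let k := l.length
  if k = 1 then some true
  else if k = 0 then none  -- Python: pelin("") recurses on itself forever (RecursionError); excluded by Pre_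
  else if l = l.reverse then
    if k % 2 = 0 then
      match pelinList (l.take (k / 2)) with
      | some true =>
        match pelinList (l.drop (k / 2)) with
        | some true => some true
        | _ => none
      | _ => none
    else
      match pelinList (l.take (k / 2)) with
      | some true =>
        match pelinList (l.drop (k / 2 + 1)) with
        | some true => some true
        | _ => none
      | _ => none
  else some false
termination_by l.length
decreasing_by
  · simp; omega
  · simp; omega
  · simp; omega
  · simp; omega

def pelin (s : String) : Option Bool := pelinList s.toList

-- ===== PORT B =====
-- the while-loop of Source B: t halves each round, so it terminates
def pelinLoopB (t : List Char) : Bool :=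
  if t.length > 1 then
    if t ≠ t.reverse then false
    else pelinLoopB (t.take (t.length / 2))
  else true
termination_by t.length
decreasing_by simp; omega

def pelin_alt (s : String) : Option Bool :=
  let l := s.toList
  if l ≠ l.reverse then some false
  else some (pelinLoopB (l.take (l.length / 2)))

-- ===== PRECONDITION & SPEC =====
-- Pre_ excludes the empty string, on which A raises RecursionError, and
-- palindromes one of whose iterated left-half prefixes is not a palindrome:
-- there A falls off the end of the function and returns None, not a bool
-- (B returns False there).
def Pre_pelin (s : String) : Prop :=
  s.toList ≠ [] ∧
  (s.toList ≠ s.toList.reverse ∨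
    ∀ k < s.toList.length,
      (s.toList.take (s.toList.length / 2 ^ k)) =
        (s.toList.take (s.toList.length / 2 ^ k)).reverse)
instance (s : String) : Decidable (Pre_pelin s) := by unfold Pre_pelin; infer_instance
def pvWitness_pelin : String := "aaaa"

def Spec_pelin (s : String) (out : Option Bool) : Prop := out = pelin_alt s
instance (s : String) (out : Option Bool) : Decidable (Spec_pelin s out) := by unfold Spec_pelin; infer_instance

-- ===== CLAIM =====
def Claim_equal_pelin : Prop := ∀ (s : String), Dom_pelin s → Pre_pelin s → Spec_pelin s (pelin s)

-- ===== LEMMAS AND PROOFS =====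

-- allPal l: every iterated left-half prefix of l (including l itself) is a palindrome
def allPal (l : List Char) : Prop :=
  ∀ k : Nat, (l.take (l.length / 2 ^ k)) = (l.take (l.length / 2 ^ k)).reverse

lemma bounded_allPal (l : List Char)
    (h : ∀ k < l.length,
      (l.take (l.length / 2 ^ k)) = (l.take (l.length / 2 ^ k)).reverse) :
    allPal l := by
  intro k
  by_cases hk : k < l.length
  · exact h k hk
  · have h1 : l.length < 2 ^ k :=
      lt_of_lt_of_le (Nat.lt_two_pow_self) (Nat.pow_le_pow_right (by norm_num) (by omega))
    rw [Nat.div_eq_of_lt h1]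
    simp

lemma allPal_self (l : List Char) (h : allPal l) : l = l.reverse := by
  have := h 0
  simpa using this

lemma allPal_half (l : List Char) (h : allPal l) : allPal (l.take (l.length / 2)) := by
  intro k
  have hlen : (l.take (l.length / 2)).length = l.length / 2 := by
    simp [List.length_take]
    omega
  rw [hlen, List.take_take]
  have hdd : l.length / 2 / 2 ^ k = l.length / 2 ^ (k + 1) := by
    rw [Nat.div_div_eq_div_mul]
    congr 1
    rw [pow_succ]
    ring
  have hmin : min (l.length / 2 / 2 ^ k) (l.length / 2) = l.length / 2 ^ (k + 1) := by
    rw [hdd]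
    have : l.length / 2 ^ (k + 1) ≤ l.length / 2 := by
      rw [← hdd]
      exact Nat.div_le_self _ _
    omega
  rw [hmin]
  exact h (k + 1)

lemma loopB_true (l : List Char) (h : allPal l) : pelinLoopB l = true := by
  rw [pelinLoopB]
  by_cases h1 : l.length > 1
  · rw [if_pos h1, if_neg (not_not_intro (allPal_self l h))]
    exact loopB_true (l.take (l.length / 2)) (allPal_half l h)
  · rw [if_neg h1]
termination_by l.length
decreasing_by simp; omega

lemma palin_of_short (l : List Char) (h : l.length ≤ 1) : l = l.reverse := by
  match l with
  | [] => rfl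
  | [a] => rfl

lemma pelinList_not_palin (l : List Char) (h : ¬ l = l.reverse) : pelinList l = some false := by
  have h2 : 2 ≤ l.length := by
    by_contra hc
    exact h (palin_of_short l (by omega))
  rw [pelinList]
  simp [show ¬ l.length = 1 by omega, show ¬ l.length = 0 by omega, h]

-- A is reversal-invariant (it only ever compares l with l.reverse at the top).
lemma pelinList_reverse (l : List Char) : pelinList l.reverse = pelinList l := by
  by_cases h : l = l.reverse
  · rw [← h]
  · have h' : ¬ l.reverse = l.reverse.reverse := by
      simp only [List.reverse_reverse]
      intro he; exact h he.symm
    rw [pelinList_not_palin l h, pelinList_not_palin l.reverse h']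

-- For a palindrome of length ≥ 2, the second recursive call in A equals the first:
-- the right half is the reverse of the left half.
lemma pelinList_palindrome (l : List Char) (hp : l = l.reverse) (h2 : 2 ≤ l.length) :
    pelinList l = (if pelinList (l.take (l.length / 2)) = some true then some true else none) := by
  rw [pelinList]
  have h1 : ¬ l.length = 1 := by omega
  have h0 : ¬ l.length = 0 := by omega
  simp only [if_neg h1, if_neg h0, if_pos hp]
  by_cases he : l.length % 2 = 0
  · simp only [if_pos he]
    have hr : pelinList (l.drop (l.length / 2)) = pelinList (l.take (l.length / 2)) := by
      have hd : l.drop (l.length / 2) = (l.take (l.length / 2)).reverse := by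
        conv_lhs => rw [hp]
        rw [List.drop_reverse]
        simp only [List.length_reverse]
        rw [show l.length - l.length / 2 = l.length / 2 by omega]
      rw [hd, pelinList_reverse]
    rw [hr]
    cases hv : pelinList (l.take (l.length / 2)) with
    | none => simp
    | some b => cases b <;> simp
  · simp only [if_neg he]
    have hr : pelinList (l.drop (l.length / 2 + 1)) = pelinList (l.take (l.length / 2)) := by
      have hd : l.drop (l.length / 2 + 1) = (l.take (l.length / 2)).reverse := by
        conv_lhs => rw [hp]
        rw [List.drop_reverse]
        simp only [List.length_reverse]
        rw [show l.length - (l.length / 2 + 1) = l.length / 2 by omega]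
      rw [hd, pelinList_reverse]
    rw [hr]
    cases hv : pelinList (l.take (l.length / 2)) with
    | none => simp
    | some b => cases b <;> simp

-- A returns True on non-empty recursive palindromes.
lemma pelinList_allPal (l : List Char) (hne : l ≠ []) (h : allPal l) :
    pelinList l = some true := by
  by_cases h1 : l.length = 1
  · rw [pelinList]
    simp [h1]
  · have h2 : 2 ≤ l.length := by
      have : l.length ≠ 0 := by simpa using hne
      omega
    rw [pelinList_palindrome l (allPal_self l h) h2]
    have hne' : l.take (l.length / 2) ≠ [] := by
      intro hnil
      rcases List.take_eq_nil_iff.mp hnil with h' | h'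
      · omega
      · simp [h'] at h2
    rw [pelinList_allPal (l.take (l.length / 2)) hne' (allPal_half l h)]
    simp
termination_by l.length
decreasing_by simp; omega

-- ===== VERDICT =====
theorem pelin_spec : Claim_equal_pelin := by
  intro s _ hpre
  obtain ⟨hne, hcase⟩ := hpre
  unfold Spec_pelin pelin pelin_alt
  rcases hcase with hnp | hall
  · rw [pelinList_not_palin s.toList hnp]
    simp [hnp]
  · have h := bounded_allPal s.toList hall
    have hb := loopB_true (s.toList.take (s.toList.length / 2)) (allPal_half s.toList h)
    rw [pelinList_allPal s.toList hne h]
    simp only [if_neg (not_not_intro (allPal_self s.toList h)), hb]
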